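-- pv_equiv track=rewrite | github.com/MarcosRomagnoli/practica-1 | game.py | mostrar_palabra
-- ===== SOURCE A (Python) =====
-- def mostrar_palabra(dificultad ,secret_word, guessed_letters):
--     if (dificultad==1):
--         vocales = "aeiou"
--         displayed_word = ""
--         for letter in secret_word:
--             if letter in vocales or letter in guessed_letters:
--                 displayed_word += letter
--             else:
--                 displayed_word += "_"
--         return displayed_word
--     elif (dificultad==2):
--         displayed_word = secret_word[0] + "_" * (len(secret_word) - 2) + secret_word[-1]
--         for letter in guessed_letters:
--             if letter in secret_word:
--                 for i in range(1, len(secret_word) - 1):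
--                     if secret_word[i] == letter:
--                         displayed_word = displayed_word[:i] + letter + displayed_word[i + 1:]
--         return displayed_word
--     else:
--         letters = ["_" if letter not in guessed_letters else letter for letter in secret_word]
--         return "".join(letters)
-- ===== SOURCE B (Python) =====
-- def mostrar_palabra(dificultad, secret_word, guessed_letters):
--     guessed = set(guessed_letters)
--     if dificultad == 1:
--         vocales = set("aeiou")
--         return "".join(c if c in vocales or c in guessed else "_" for c in secret_word)
--     elif dificultad == 2:
--         n = len(secret_word)
--         interior = "".join(c if c in guessed else "_" for c in secret_word[1:n - 1])
--         return secret_word[0] + interior + secret_word[-1]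
--     else:
--         return "".join(c if c in guessed else "_" for c in secret_word)
-- ===== Notes on version B (the rewrite author's own statement) =====
-- stated objective: simpler
-- what changed: Difficulty 2's per-guessed-letter nested positional reveal loop with string slicing is replaced by one forward pass over the interior slice revealing each character by membership in a set built once from guessed_letters; difficulties 1 and 3 become single per-character joins over precomputed sets.
import Mathlib
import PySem

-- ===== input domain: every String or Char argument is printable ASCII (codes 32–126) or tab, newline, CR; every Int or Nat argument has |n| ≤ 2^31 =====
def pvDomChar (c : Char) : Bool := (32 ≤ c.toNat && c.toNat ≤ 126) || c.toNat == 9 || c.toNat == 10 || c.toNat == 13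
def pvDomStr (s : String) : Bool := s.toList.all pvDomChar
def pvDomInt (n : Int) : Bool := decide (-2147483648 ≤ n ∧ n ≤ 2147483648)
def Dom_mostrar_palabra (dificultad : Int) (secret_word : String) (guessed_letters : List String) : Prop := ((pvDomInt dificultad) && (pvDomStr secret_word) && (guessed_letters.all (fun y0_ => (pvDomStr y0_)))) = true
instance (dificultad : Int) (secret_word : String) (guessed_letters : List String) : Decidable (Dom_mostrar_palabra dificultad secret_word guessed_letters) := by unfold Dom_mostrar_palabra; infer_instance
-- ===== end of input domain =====

-- B replaces A's per-guessed-letter × per-position slice-rewriting reveal loop (difficulty 2) by a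
-- single pass over the interior characters with set membership; difficulties 1 and 3 become direct
-- per-character maps over one precomputed set. Objective: simpler (same asymptotics at these sizes).

-- ===== PORT A =====
-- Python 'letter in guessed_letters' for a 1-char string: list membership by string equality (= char-list equality); exact
def pvGuessedHasChar (gl : List String) (c : Char) : Bool := gl.any (fun g => g.toList == [c])

-- 'letter in vocales' is a 1-char substring test (PySem.Chars.isIn, exact); secret_word[i] == letter compares
-- the 1-char string s[i] with the string letter; slices/negative index/ranges via PySem primitives.
def mostrar_palabra (dificultad : Int) (secret_word : String) (guessed_letters : List String) : String :=
  if dificultad == 1 then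
    String.ofList (secret_word.toList.foldl (fun acc letter =>
      if PySem.Chars.isIn [letter] ("aeiou".toList) || pvGuessedHasChar guessed_letters letter
      then acc ++ [letter] else acc ++ ['_']) [])
  else if dificultad == 2 then
    match PySem.List.pyGet? secret_word.toList 0, PySem.List.pyGet? secret_word.toList (-1) with
    | some c0, some cl =>
      String.ofList (guessed_letters.foldl (fun d letter =>
        if PySem.Chars.isIn letter.toList secret_word.toList then
          (PySem.List.pyRange 1 ((secret_word.toList.length : Int) - 1) 1).foldl (fun d i =>
            if (PySem.List.pyGet? secret_word.toList i).map (fun c => [c]) == some letter.toList then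
              PySem.List.slice d none (some i) ++ letter.toList ++ PySem.List.slice d (some (i + 1)) none
            else d) d
        else d) ([c0] ++ PySem.List.pyRepeat ['_'] ((secret_word.toList.length : Int) - 2) ++ [cl]))
    | _, _ => ""
  else
    String.ofList (secret_word.toList.map (fun letter =>
      if !(pvGuessedHasChar guessed_letters letter) then '_' else letter))


-- ===== PORT B =====
-- one precomputed set of guessed letters (as char lists); difficulty 2 is a single map over the interior slice
def mostrar_palabra_alt (dificultad : Int) (secret_word : String) (guessed_letters : List String) : String :=
  if dificultad == 1 then
    String.ofList (secret_word.toList.map (fun c =>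
      if (PySem.Set.ofList "aeiou".toList).contains c
         || (PySem.Set.ofList (guessed_letters.map String.toList)).contains [c] then c else '_'))
  else if dificultad == 2 then
    -- secret_word[0] / secret_word[-1]: none (IndexError, empty word) is excluded by Pre_
    (((PySem.List.pyGet? secret_word.toList 0).bind (fun c0 =>
      (PySem.List.pyGet? secret_word.toList (-1)).map (fun cl =>
        String.ofList ([c0] ++ (PySem.List.slice secret_word.toList (some 1)
            (some ((secret_word.toList.length : Int) - 1))).map
          (fun c => if (PySem.Set.ofList (guessed_letters.map String.toList)).contains [c] then c else '_') ++ [cl])))).getD "")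
  else
    String.ofList (secret_word.toList.map (fun c =>
      if (PySem.Set.ofList (guessed_letters.map String.toList)).contains [c] then c else '_'))

-- ===== PRECONDITION & SPEC =====
-- Pre_ excludes only (dificultad = 2, secret_word = ""), where A raises IndexError on secret_word[0] (B raises there too)
def Pre_mostrar_palabra (dificultad : Int) (secret_word : String) (guessed_letters : List String) : Prop :=
  dificultad = 2 → secret_word ≠ ""

instance (dificultad : Int) (secret_word : String) (guessed_letters : List String) : Decidable (Pre_mostrar_palabra dificultad secret_word guessed_letters) := by unfold Pre_mostrar_palabra; infer_instance

def pvWitness_mostrar_palabra : Int × String × List String := (2, "casa", ["a", "s"])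

def Spec_mostrar_palabra (dificultad : Int) (secret_word : String) (guessed_letters : List String) (out : String) : Prop := out = mostrar_palabra_alt dificultad secret_word guessed_letters
instance (dificultad : Int) (secret_word : String) (guessed_letters : List String) (out : String) : Decidable (Spec_mostrar_palabra dificultad secret_word guessed_letters out) := by unfold Spec_mostrar_palabra; infer_instance

-- ===== CLAIM (what is proved, stated in full; the proofs are below) =====
def Claim_equal_mostrar_palabra : Prop := ∀ (dificultad : Int) (secret_word : String) (guessed_letters : List String), Dom_mostrar_palabra dificultad secret_word guessed_letters → Pre_mostrar_palabra dificultad secret_word guessed_letters → Spec_mostrar_palabra dificultad secret_word guessed_letters (mostrar_palabra dificultad secret_word guessed_letters)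

-- ===== LEMMAS AND PROOFS =====

def pvRender (s : List Char) (q : Nat → Bool) : List Char :=
  (List.range s.length).map (fun j =>
    if j = 0 ∨ j = s.length - 1 then s.getD j '_' else if q j then s.getD j '_' else '_')
theorem pvRender_congr (s : List Char) (q q' : Nat → Bool)
    (h : ∀ t, 0 < t → t < s.length - 1 → q t = q' t) : pvRender s q = pvRender s q' := by
  unfold pvRender
  apply List.map_congr_left
  intro j hj
  simp only [List.mem_range] at hj
  by_cases h0 : j = 0 ∨ j = s.length - 1
  · simp [h0]
  · rw [h j (by omega) (by omega)]
theorem pvRender_set (s : List Char) (q : Nat → Bool) (j : Nat) (h1 : 1 ≤ j) (h2 : j ≤ s.length - 2)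
    (hn : 2 ≤ s.length) :
    (pvRender s q).set j (s.getD j '_') = pvRender s (fun t => t == j || q t) := by
  apply List.ext_getElem
  · simp [pvRender]
  · intro i hi hi'
    simp only [pvRender, List.length_set, List.length_map, List.length_range] at hi hi' ⊢
    rw [List.getElem_set]
    simp only [List.getElem_map, List.getElem_range]
    by_cases hij : j = i
    · subst hij
      have : ¬ (j = 0 ∨ j = s.length - 1) := by omega
      simp [this]
    · simp [hij, Ne.symm hij]
theorem pvStep (s : List Char) (q : Nat → Bool) (j : Nat) (h1 : 1 ≤ j) (h2 : j ≤ s.length - 2)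
    (hn : 2 ≤ s.length) :
    PySem.List.slice (pvRender s q) none (some (j : Int)) ++ [s.getD j '_'] ++
      PySem.List.slice (pvRender s q) (some ((j : Int) + 1)) none
    = pvRender s (fun t => t == j || q t) := by
  have hc : (j:Int)+1 = ((j+1:Nat):Int) := by push_cast; ring
  rw [PySem.List.slice_to_natCast, hc, PySem.List.slice_from_natCast]
  have hlen : j < (pvRender s q).length := by simp [pvRender]; omega
  rw [← pvRender_set s q j h1 h2 hn, List.set_eq_take_append_cons_drop, if_pos hlen]
  simp
theorem pvInner (s : List Char) (ℓ : List Char) (hn : 2 ≤ s.length) :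
    ∀ (L : List Int), (∀ i ∈ L, 1 ≤ i ∧ i < (s.length : Int) - 1) → ∀ q : Nat → Bool,
    L.foldl (fun d i =>
        if (PySem.List.pyGet? s i).map (fun c => [c]) == some ℓ then
          PySem.List.slice d none (some i) ++ ℓ ++ PySem.List.slice d (some (i + 1)) none
        else d) (pvRender s q)
    = pvRender s (fun t => q t || (L.any (fun i => i == (t : Int)) && (ℓ == [s.getD t '_']))) := by
  intro L
  induction L with
  | nil => intro _ q; simp
  | cons i L ih =>
    intro hmem q
    have hi := hmem i (by simp)
    obtain ⟨j, rfl⟩ : ∃ j : Nat, i = (j : Int) := ⟨i.toNat, by omega⟩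
    have hjr : 1 ≤ j ∧ j ≤ s.length - 2 := by omega
    have hget : PySem.List.pyGet? s (j:Int) = some s[j] := by
      rw [PySem.List.pyGet?_natCast, List.getElem?_eq_getElem (by omega)]
    have hgd : s.getD j '_' = s[j] := by
      rw [List.getD_eq_getElem _ _ (by omega)]
    simp only [List.foldl_cons]
    by_cases hfire : ℓ = [s[j]]
    · rw [if_pos (by rw [hget]; simp [hfire])]
      have := pvStep s q j hjr.1 hjr.2 hn
      rw [hgd, ← hfire] at this
      rw [this, ih (fun i' hi' => hmem i' (by simp [hi']))]
      apply pvRender_congr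
      intro t h0 h1
      simp only [List.any_cons]
      by_cases htj : t = j
      · subst htj
        simp [hfire, List.getElem?_eq_getElem (show t < s.length by omega)]
      · have hne : ¬ ((j:Int) = (t:Int)) := by omega
        have hne2 : ¬ (t = j) := by omega
        rw [beq_eq_false_iff_ne.mpr hne2, beq_eq_false_iff_ne.mpr hne]
        simp
    · rw [if_neg (by rw [hget]; simp; intro h; exact hfire h.symm)]
      rw [ih (fun i' hi' => hmem i' (by simp [hi']))]
      apply pvRender_congr
      intro t h0 h1
      simp only [List.any_cons]
      by_cases htj : t = j
      · subst htj
        rw [hgd, beq_eq_false_iff_ne.mpr hfire]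
        simp
      · have hne : ¬ ((j:Int) = (t:Int)) := by omega
        rw [beq_eq_false_iff_ne.mpr hne]
        simp

theorem pvOuter (s : List Char) (hn : 2 ≤ s.length) (gl : List String) :
    ∀ q : Nat → Bool,
    gl.foldl (fun d letter =>
        if PySem.Chars.isIn letter.toList s then
          (PySem.List.pyRange 1 ((s.length : Int) - 1) 1).foldl (fun d i =>
            if (PySem.List.pyGet? s i).map (fun c => [c]) == some letter.toList then
              PySem.List.slice d none (some i) ++ letter.toList ++ PySem.List.slice d (some (i + 1)) none
            else d) d
        else d) (pvRender s q)
    = pvRender s (fun t => q t || gl.any (fun g => g.toList == [s.getD t '_'])) := by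
  induction gl with
  | nil => intro q; simp
  | cons g gl ih =>
    intro q
    simp only [List.foldl_cons]
    by_cases hg : PySem.Chars.isIn g.toList s
    · rw [if_pos hg]
      rw [pvInner s g.toList hn _ (fun i hi => (PySem.List.mem_pyRange_one.mp hi)) q, ih]
      apply pvRender_congr
      intro t h0 h1
      have hmem : (t : Int) ∈ PySem.List.pyRange 1 ((s.length : Int) - 1) 1 := by
        rw [PySem.List.mem_pyRange_one]; omega
      have hany : (PySem.List.pyRange 1 ((s.length : Int) - 1) 1).any (fun i => i == (t:Int)) = true := by
        simp only [List.any_eq_true]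
        exact ⟨(t:Int), hmem, by simp⟩
      simp only [List.any_cons, hany, Bool.true_and, Bool.or_assoc]
    · rw [if_neg hg]
      rw [ih]
      apply pvRender_congr
      intro t h0 h1
      have hgne : ¬ (g.toList = [s.getD t '_']) := by
        intro h
        apply hg
        rw [PySem.Chars.isIn_iff_infix, h, List.getD_eq_getElem _ _ (by omega)]
        exact (List.singleton_infix_iff _ _).mpr (List.getElem_mem _)
      simp only [List.any_cons, beq_eq_false_iff_ne.mpr hgne, Bool.false_or]

theorem pvBase (s : List Char) (hn : 2 ≤ s.length) (c0 cl : Char)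
    (h0 : PySem.List.pyGet? s 0 = some c0) (hl : PySem.List.pyGet? s (-1) = some cl) :
    [c0] ++ PySem.List.pyRepeat ['_'] ((s.length : Int) - 2) ++ [cl] = pvRender s (fun _ => false) := by
  rw [PySem.List.pyRepeat_singleton]
  have hrep : ((s.length : Int) - 2).toNat = s.length - 2 := by omega
  rw [hrep]
  have hc0 : c0 = s[0] := by
    rw [PySem.List.pyGet?_zero, List.getElem?_eq_getElem (by omega)] at h0
    exact (Option.some_injective _ h0).symm
  have hcl : cl = s[s.length - 1] := by
    rw [PySem.List.pyGet?_neg_one, List.getLast?_eq_getElem?, List.getElem?_eq_getElem (by omega)] at hl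
    exact (Option.some_injective _ hl).symm
  apply List.ext_getElem
  · simp [pvRender]; omega
  · intro i hi hi'
    simp only [pvRender, List.length_map, List.length_range] at hi' ⊢
    simp only [List.getElem_map, List.getElem_range]
    by_cases hzero : i = 0
    · subst hzero
      simp [hc0, List.getElem?_eq_getElem (show 0 < s.length by omega)]
    · by_cases hlast : i = s.length - 1
      · rw [List.getElem_append_right (by simp; omega)]
        simp [hlast, hcl, List.getElem?_eq_getElem (show s.length - 1 < s.length by omega)]
      · rw [List.getElem_append_left (by simp; omega),
            List.getElem_append_right (show ([c0]).length ≤ i by simp; omega),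
            List.getElem_replicate]
        have : ¬ (i = 0 ∨ i = s.length - 1) := by omega
        simp [this]

theorem pvAltShape (s : List Char) (hn : 2 ≤ s.length) (c0 cl : Char) (P : Char → Bool)
    (h0 : PySem.List.pyGet? s 0 = some c0) (hl : PySem.List.pyGet? s (-1) = some cl) :
    [c0] ++ (PySem.List.slice s (some 1) (some ((s.length : Int) - 1))).map
        (fun c => if P c then c else '_') ++ [cl]
    = pvRender s (fun t => P (s.getD t '_')) := by
  have hb : ((s.length : Int) - 1) = ((s.length - 1 : Nat) : Int) := by omega
  have h1 : (1 : Int) = ((1 : Nat) : Int) := by norm_num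
  rw [hb, h1, PySem.List.slice_natCast]
  have hc0 : c0 = s[0] := by
    rw [PySem.List.pyGet?_zero, List.getElem?_eq_getElem (by omega)] at h0
    exact (Option.some_injective _ h0).symm
  have hcl : cl = s[s.length - 1] := by
    rw [PySem.List.pyGet?_neg_one, List.getLast?_eq_getElem?, List.getElem?_eq_getElem (by omega)] at hl
    exact (Option.some_injective _ hl).symm
  apply List.ext_getElem
  · simp [pvRender]; omega
  · intro i hi hi'
    simp only [pvRender, List.length_map, List.length_range] at hi' ⊢
    simp only [List.getElem_map, List.getElem_range]
    by_cases hzero : i = 0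
    · subst hzero
      simp [hc0, List.getElem?_eq_getElem (show 0 < s.length by omega)]
    · by_cases hlast : i = s.length - 1
      · rw [List.getElem_append_right (by simp; omega)]
        simp [hlast, hcl, List.getElem?_eq_getElem (show s.length - 1 < s.length by omega)]
      · rw [List.getElem_append_left (by simp; omega),
            List.getElem_append_right (show ([c0]).length ≤ i by simp; omega)]
        simp only [List.getElem_map, List.length_cons, List.length_nil]
        rw [List.getElem_take, List.getElem_drop]
        simp only [show 1 + (i - (0 + 1)) = i from by omega]
        have : ¬ (i = 0 ∨ i = s.length - 1) := by omega
        simp [this, List.getElem?_eq_getElem (show i < s.length by omega)]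

theorem pvSetContains (gl : List String) (c : Char) :
    (PySem.Set.ofList (gl.map String.toList)).contains [c] = gl.any (fun g => g.toList == [c]) := by
  rw [show (PySem.Set.ofList (gl.map String.toList)).contains [c]
        = List.contains (PySem.Set.ofList (gl.map String.toList)) [c] from rfl,
     List.contains_eq_mem]
  simp only [PySem.Set.mem_ofList, List.mem_map]
  by_cases h : ∃ g ∈ gl, g.toList = [c]
  · obtain ⟨g, hg, hgc⟩ := h
    rw [decide_eq_true (by exact ⟨g, hg, hgc⟩)]
    exact (List.any_eq_true.mpr ⟨g, hg, by simp [hgc]⟩).symm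
  · rw [decide_eq_false (by simpa using h)]
    symm
    rw [List.any_eq_false]
    intro g hg
    simp only [beq_iff_eq]
    exact fun hc => h ⟨g, hg, hc⟩

theorem pvCharSetContains (l : List Char) (c : Char) :
    (PySem.Set.ofList l).contains c = PySem.Chars.isIn [c] l := by
  rw [show (PySem.Set.ofList l).contains c = List.contains (PySem.Set.ofList l) c from rfl,
      List.contains_eq_mem]
  by_cases h : c ∈ l
  · rw [decide_eq_true ((PySem.Set.mem_ofList _ _).mpr h)]
    exact ((PySem.Chars.isIn_iff_infix _ _).mpr ((List.singleton_infix_iff _ _).mpr h)).symm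
  · rw [decide_eq_false (fun hm => h ((PySem.Set.mem_ofList _ _).mp hm))]
    exact ((PySem.Chars.isIn_eq_false_iff _ _).mpr
      (fun hinf => h ((List.singleton_infix_iff _ _).mp hinf))).symm



theorem pvCase2Main (secret_word : String) (guessed_letters : List String)
    (hn : 2 ≤ secret_word.toList.length) :
    (match PySem.List.pyGet? secret_word.toList 0, PySem.List.pyGet? secret_word.toList (-1) with
    | some c0, some cl =>
      String.ofList (guessed_letters.foldl (fun d letter =>
        if PySem.Chars.isIn letter.toList secret_word.toList then
          (PySem.List.pyRange 1 ((secret_word.toList.length : Int) - 1) 1).foldl (fun d i =>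
            if (PySem.List.pyGet? secret_word.toList i).map (fun c => [c]) == some letter.toList then
              PySem.List.slice d none (some i) ++ letter.toList ++ PySem.List.slice d (some (i + 1)) none
            else d) d
        else d) ([c0] ++ PySem.List.pyRepeat ['_'] ((secret_word.toList.length : Int) - 2) ++ [cl]))
    | _, _ => "")
    = ((((PySem.List.pyGet? secret_word.toList 0).bind (fun c0 =>
      (PySem.List.pyGet? secret_word.toList (-1)).map (fun cl =>
        String.ofList ([c0] ++ (PySem.List.slice secret_word.toList (some 1)
            (some ((secret_word.toList.length : Int) - 1))).map
          (fun c => if (PySem.Set.ofList (guessed_letters.map String.toList)).contains [c] then c else '_') ++ [cl])))).getD "")) := by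
  have h0 : ∃ c0, PySem.List.pyGet? secret_word.toList 0 = some c0 := by
    rw [PySem.List.pyGet?_zero, List.getElem?_eq_getElem (by omega)]; exact ⟨_, rfl⟩
  have hl : ∃ cl, PySem.List.pyGet? secret_word.toList (-1) = some cl := by
    rw [PySem.List.pyGet?_neg_one, List.getLast?_eq_getElem?, List.getElem?_eq_getElem (by omega)]
    exact ⟨_, rfl⟩
  obtain ⟨c0, h0⟩ := h0
  obtain ⟨cl, hl⟩ := hl
  rw [h0, hl]
  dsimp only
  simp only [Option.bind_some, Option.map_some, Option.getD_some]
  rw [pvBase secret_word.toList hn c0 cl h0 hl,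
      pvOuter secret_word.toList hn guessed_letters,
      pvAltShape secret_word.toList hn c0 cl _ h0 hl]
  congr 1
  apply pvRender_congr
  intro t _ _
  rw [pvSetContains]
  simp

theorem pvMain (dificultad : Int) (secret_word : String) (guessed_letters : List String)
    (hpre : dificultad = 2 → secret_word ≠ "") :
    mostrar_palabra dificultad secret_word guessed_letters
    = mostrar_palabra_alt dificultad secret_word guessed_letters := by
  unfold mostrar_palabra mostrar_palabra_alt
  by_cases h1 : dificultad = 1
  · simp only [if_pos (show (dificultad == 1) = true by simp [h1])]
    rw [PySem.List.foldl_congr_mem secret_word.toList _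
          (fun acc letter => acc ++ [if PySem.Chars.isIn [letter] ("aeiou".toList) || pvGuessedHasChar guessed_letters letter then letter else '_']) []
          (by intro acc x _
              dsimp only
              by_cases h : (PySem.Chars.isIn [x] ("aeiou".toList) || pvGuessedHasChar guessed_letters x) = true
              · rw [if_pos h, if_pos h]
              · rw [if_neg h, if_neg h]),
        PySem.List.foldl_append_singleton_eq_map, List.nil_append]
    congr 1
    apply List.map_congr_left
    intro c _
    rw [pvCharSetContains, pvSetContains]
    rfl
  · simp only [if_neg (show ¬ ((dificultad == 1) = true) by simp [h1])]
    by_cases h2 : dificultad = 2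
    · simp only [if_pos (show (dificultad == 2) = true by simp [h2])]
      have hs : secret_word.toList ≠ [] := by
        intro h
        exact hpre h2 (by rw [← secret_word.ofList_toList, h])
      by_cases hn : 2 ≤ secret_word.toList.length
      · exact pvCase2Main secret_word guessed_letters hn
      · obtain ⟨a, ha⟩ : ∃ a, secret_word.toList = [a] := by
          cases hsl : secret_word.toList with
          | nil => exact absurd hsl hs
          | cons x t => cases t with
            | nil => exact ⟨x, rfl⟩
            | cons y t2 => exact absurd (by rw [hsl]; simp) hn
        rw [ha, show (([a] : List Char).length : Int) = 1 from by simp]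
        rw [show PySem.List.pyRange 1 ((1 : Int) - 1) 1 = [] from by decide]
        rw [show PySem.List.pyGet? ([a] : List Char) 0 = some a from by
              rw [PySem.List.pyGet?_zero]; rfl,
            show PySem.List.pyGet? ([a] : List Char) (-1) = some a from by
              rw [PySem.List.pyGet?_neg_one]; rfl]
        dsimp only
        rw [PySem.List.foldl_congr_mem guessed_letters _ (fun d _ => d) _
              (by intro acc x _; dsimp only [List.foldl_nil]; split <;> rfl),
            PySem.List.foldl_ignore]
        rw [show PySem.List.pyRepeat ['_'] ((1 : Int) - 2) = [] from by decide,
            show PySem.List.slice ([a] : List Char) (some 1) (some ((1 : Int) - 1)) = [] from by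
              rw [PySem.List.slice_toNat _ (by norm_num) (by norm_num)]; rfl]
        rfl
    · simp only [if_neg (show ¬ ((dificultad == 2) = true) by simp [h2])]
      congr 1
      apply List.map_congr_left
      intro c _
      rw [pvSetContains,
          show (guessed_letters.any fun g => g.toList == [c]) = pvGuessedHasChar guessed_letters c from rfl]
      cases hb : pvGuessedHasChar guessed_letters c <;> simp

-- ===== VERDICT (by name: the statement is the Claim_ definition above) =====
theorem mostrar_palabra_spec : Claim_equal_mostrar_palabra := by
  intro dificultad secret_word guessed_letters _ hpre
  exact pvMain dificultad secret_word guessed_letters hpre
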